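-- pv_equiv track=rewrite | github.com/maxzonder/polymarket-bot | scripts/backfill_market_resolutions.py | _select_yes_no_tokens
-- ===== SOURCE A (Python) =====
-- from typing import Any, Callable, Iterable
--
-- def _select_yes_no_tokens(token_ids: list[Any], outcomes: list[Any]) -> tuple[str | None, str | None]:
--     pairs = [(str(token_id), str(outcome)) for token_id, outcome in zip(token_ids, outcomes)]
--     if not pairs:
--         return None, None
--     yes = next((token_id for token_id, outcome in pairs if outcome.strip().lower() in {"yes", "up"}), None)
--     no = next((token_id for token_id, outcome in pairs if outcome.strip().lower() in {"no", "down"}), None)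
--     if yes and no:
--         return yes, no
--     if len(pairs) >= 2:
--         return pairs[0][0], pairs[1][0]
--     return pairs[0][0], None
-- ===== SOURCE B (Python) =====
-- def _select_yes_no_tokens(token_ids, outcomes):
--     yes = no = first = second = None
--     for tid, oc in zip(token_ids, outcomes):
--         tid = str(tid)
--         key = str(oc).strip().lower()
--         if first is None:
--             first = tid
--         elif second is None:
--             second = tid
--         if yes is None and key in ("yes", "up"):
--             yes = tid
--         if no is None and key in ("no", "down"):
--             no = tid
--     if yes and no:
--         return yes, no
--     return first, second
-- ===== Notes on version B (the rewrite author's own statement) =====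
-- stated objective: simpler
-- what changed: Replaces the pair-list build plus two separate next() generator scans and the length-indexed three-way fallback with a single pass that tracks yes/no/first/second as it goes, collapsing the fallback into one return of (first, second).
import Mathlib
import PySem

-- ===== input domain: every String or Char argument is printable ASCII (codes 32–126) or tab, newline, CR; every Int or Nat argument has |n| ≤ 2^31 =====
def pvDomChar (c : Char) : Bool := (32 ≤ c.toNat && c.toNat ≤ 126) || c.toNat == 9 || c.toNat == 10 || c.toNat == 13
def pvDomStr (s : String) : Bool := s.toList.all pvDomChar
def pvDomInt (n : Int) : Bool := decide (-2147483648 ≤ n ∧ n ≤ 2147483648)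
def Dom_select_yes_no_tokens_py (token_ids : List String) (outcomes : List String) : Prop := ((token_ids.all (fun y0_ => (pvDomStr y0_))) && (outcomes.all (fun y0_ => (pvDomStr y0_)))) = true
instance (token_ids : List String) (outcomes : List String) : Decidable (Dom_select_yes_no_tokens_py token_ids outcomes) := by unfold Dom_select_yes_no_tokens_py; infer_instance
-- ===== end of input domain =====

-- B replaces A's pair-list build + two next() generator scans + length-indexed fallback by one
-- pass maintaining yes/no/first/second; same return value everywhere (objective: simpler).

-- ===== PORT A =====
-- outcome.strip().lower()
def pvKey (o : String) : String := PySem.Str.lower (PySem.Str.strip o)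
-- Python truthiness of a str|None value ('' and None are falsy)
def pvTruthy (x : Option String) : Bool :=
  match x with
  | some s => s ≠ ""
  | none => false
-- next((token_id for token_id, outcome in pairs if outcome.strip().lower() in labels), None)
def pvNext (labels : List String) (pairs : List (String × String)) : Option String :=
  (pairs.find? (fun q => labels.contains (pvKey q.2))).map Prod.fst

def select_yes_no_tokens_py (token_ids : List String) (outcomes : List String) : Option String × Option String :=
  match List.zip token_ids outcomes with
  | [] => (none, none)
  | p0 :: rest =>
    if pvTruthy (pvNext ["yes", "up"] (p0 :: rest)) && pvTruthy (pvNext ["no", "down"] (p0 :: rest)) then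
      (pvNext ["yes", "up"] (p0 :: rest), pvNext ["no", "down"] (p0 :: rest))
    else
      match rest with
      | p1 :: _ => (some p0.1, some p1.1)
      | [] => (some p0.1, none)

-- ===== PORT B =====
-- the single for-loop of Source B over zip(token_ids, outcomes), state (yes, no, first, second)
def pvLoopB : List (String × String) → Option String → Option String → Option String → Option String →
    Option String × Option String × Option String × Option String
  | [], yes, no, first, second => (yes, no, first, second)
  | (t, o) :: rest, yes, no, first, second =>
    let key := pvKey o
    let first' := if first = none then some t else first
    let second' := if first ≠ none ∧ second = none then some t else second
    let yes' := if yes = none ∧ (key = "yes" ∨ key = "up") then some t else yes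
    let no' := if no = none ∧ (key = "no" ∨ key = "down") then some t else no
    pvLoopB rest yes' no' first' second'

-- Source B's final 'if yes and no: return yes, no / return first, second'
def pvFinish : Option String × Option String × Option String × Option String → Option String × Option String
  | (yes, no, first, second) => if pvTruthy yes && pvTruthy no then (yes, no) else (first, second)

def select_yes_no_tokens_py_alt (token_ids : List String) (outcomes : List String) : Option String × Option String :=
  pvFinish (pvLoopB (List.zip token_ids outcomes) none none none none)

-- ===== PRECONDITION & SPEC =====
def Spec_select_yes_no_tokens_py (token_ids : List String) (outcomes : List String) (out : Option String × Option String) : Prop := out = select_yes_no_tokens_py_alt token_ids outcomes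
instance (token_ids : List String) (outcomes : List String) (out : Option String × Option String) : Decidable (Spec_select_yes_no_tokens_py token_ids outcomes out) := by unfold Spec_select_yes_no_tokens_py; infer_instance

-- ===== CLAIM (what is proved, stated in full; the proofs are below) =====
def Claim_equal_select_yes_no_tokens_py : Prop := ∀ (token_ids : List String) (outcomes : List String), Dom_select_yes_no_tokens_py token_ids outcomes → Spec_select_yes_no_tokens_py token_ids outcomes (select_yes_no_tokens_py token_ids outcomes)

-- ===== LEMMAS AND PROOFS =====

lemma contains_pair (a b x : String) : ([a, b].contains x) = decide (x = a ∨ x = b) := by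
  simp

lemma find?_pair (s₁ s₂ : String) (l : List (String × String)) :
    List.find? (fun q => [s₁, s₂].contains (pvKey q.2)) l
      = List.find? (fun q => decide (pvKey q.2 = s₁ ∨ pvKey q.2 = s₂)) l := by
  have hp : (fun q : String × String => [s₁, s₂].contains (pvKey q.2))
      = (fun q => decide (pvKey q.2 = s₁ ∨ pvKey q.2 = s₂)) := by
    funext q; exact contains_pair _ _ _
  rw [hp]

lemma pvNext_eq (s₁ s₂ : String) (l : List (String × String)) :
    pvNext [s₁, s₂] l
      = (l.find? (fun q => decide (pvKey q.2 = s₁ ∨ pvKey q.2 = s₂))).map Prod.fst := by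
  rw [pvNext, find?_pair]

lemma pvLoopB_eq (l : List (String × String)) (y n f s : Option String) :
    pvLoopB l y n f s =
      (y.or ((l.find? (fun q => decide (pvKey q.2 = "yes" ∨ pvKey q.2 = "up"))).map Prod.fst),
       n.or ((l.find? (fun q => decide (pvKey q.2 = "no" ∨ pvKey q.2 = "down"))).map Prod.fst),
       f.or (l.head?.map Prod.fst),
       s.or (((if f = none then l.drop 1 else l).head?).map Prod.fst)) := by
  induction l generalizing y n f s with
  | nil => cases y <;> cases n <;> cases f <;> cases s <;> rfl
  | cons p rest ih =>
    obtain ⟨t, o⟩ := p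
    rw [pvLoopB]
    by_cases hy : pvKey o = "yes" ∨ pvKey o = "up" <;>
      by_cases hn : pvKey o = "no" ∨ pvKey o = "down" <;>
      cases y <;> cases n <;> cases f <;> cases s <;>
      simp [ih, hy, hn]

-- ===== VERDICT =====
theorem select_yes_no_tokens_py_spec : Claim_equal_select_yes_no_tokens_py := by
  intro token_ids outcomes _
  unfold Spec_select_yes_no_tokens_py select_yes_no_tokens_py select_yes_no_tokens_py_alt
  rw [pvLoopB_eq]
  cases h : List.zip token_ids outcomes with
  | nil => rfl
  | cons p0 rest =>
    rw [show (if (none : Option String) = none then List.drop 1 (p0 :: rest) else p0 :: rest) = rest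
          from rfl]
    rw [Option.none_or, Option.none_or, Option.none_or, Option.none_or, pvFinish]
    split
    next heq => exact absurd heq (by simp)
    next q0 rst heq =>
      cases heq
      rw [pvNext_eq, pvNext_eq]
      split_ifs with hc
      · rfl
      · clear hc h
        cases rest <;> rfl
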